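-- pv_equiv track=rewrite | github.com/sairamsankar99/catalyze | backend/main.py | _build_voice_summary
-- ===== SOURCE A (Python) =====
-- from typing import Any
--
-- def _build_voice_summary(
--     machine: str,
--     inspector: str | None,
--     results: list[dict[str, Any]],
-- ) -> str:
--     """Build a natural-language summary suitable for text-to-speech."""
--     pass_ct = sum(1 for r in results if r.get("status") == "PASS")
--     monitor_ct = sum(1 for r in results if r.get("status") == "MONITOR")
--     fail_ct = sum(1 for r in results if r.get("status") == "FAIL")
--
--     parts = [f"Inspection report for {machine}."]
--     if inspector:
--         parts.append(f"Inspector: {inspector}.")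
--     parts.append(
--         f"Out of {len(results)} components inspected, "
--         f"{pass_ct} passed, {monitor_ct} need monitoring, and {fail_ct} failed."
--     )
--
--     attention = [
--         r for r in results if r.get("status") in ("MONITOR", "FAIL")
--     ]
--     if attention:
--         parts.append("Items requiring attention:")
--         for r in attention:
--             parts.append(
--                 f"{r.get('component', 'Unknown')}: {r.get('status')}. "
--                 f"{r.get('observation', '')} "
--                 f"Recommended action: {r.get('recommended_action', 'none')}."
--             )
--     else:
--         parts.append("All components passed inspection.")
--
--     return " ".join(parts)
-- ===== SOURCE B (Python) =====
-- def _build_voice_summary(machine, inspector, results):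
--     """Single pass over results: count statuses and collect attention items in one loop."""
--     pass_ct = monitor_ct = fail_ct = 0
--     attention = []
--     for r in results:
--         status = r.get("status")
--         if status == "PASS":
--             pass_ct += 1
--         elif status == "MONITOR":
--             monitor_ct += 1
--             attention.append(r)
--         elif status == "FAIL":
--             fail_ct += 1
--             attention.append(r)
--     head = f"Inspection report for {machine}."
--     insp = [f"Inspector: {inspector}."] if inspector else []
--     counts = (
--         f"Out of {len(results)} components inspected, "
--         f"{pass_ct} passed, {monitor_ct} need monitoring, and {fail_ct} failed."
--     )
--     if attention:
--         tail = ["Items requiring attention:"] + [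
--             f"{r.get('component', 'Unknown')}: {r.get('status')}. "
--             f"{r.get('observation', '')} "
--             f"Recommended action: {r.get('recommended_action', 'none')}."
--             for r in attention
--         ]
--     else:
--         tail = ["All components passed inspection."]
--     return " ".join([head] + insp + [counts] + tail)
-- ===== Notes on version B (the rewrite author's own statement) =====
-- stated objective: alternative
-- what changed: Replaces A's three counting comprehensions plus a separate attention filter (four scans over results) with one loop that accumulates all three counters and the attention list in a single pass, then assembles the parts list by concatenation instead of repeated appends.
import Mathlib
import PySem

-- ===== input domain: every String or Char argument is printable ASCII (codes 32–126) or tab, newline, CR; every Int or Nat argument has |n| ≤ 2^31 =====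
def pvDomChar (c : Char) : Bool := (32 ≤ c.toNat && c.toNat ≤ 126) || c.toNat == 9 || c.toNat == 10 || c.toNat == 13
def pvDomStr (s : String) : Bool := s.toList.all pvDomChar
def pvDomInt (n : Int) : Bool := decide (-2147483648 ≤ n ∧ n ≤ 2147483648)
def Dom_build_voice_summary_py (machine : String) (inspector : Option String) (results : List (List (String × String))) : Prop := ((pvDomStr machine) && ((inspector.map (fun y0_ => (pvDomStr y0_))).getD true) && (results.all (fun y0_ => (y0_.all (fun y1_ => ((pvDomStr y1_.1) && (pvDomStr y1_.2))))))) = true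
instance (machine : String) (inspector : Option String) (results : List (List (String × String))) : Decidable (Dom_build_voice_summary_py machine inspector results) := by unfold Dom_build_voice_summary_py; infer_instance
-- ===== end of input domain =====

-- B replaces A's three counting comprehensions and the attention filter (four scans) by one
-- single-pass loop accumulating the three counters and the attention list; same output.

-- ===== PORT A =====
-- dict.get(k) on the association list: first match (Lean's List.lookup), like the Python dict lookup
def aGet (r : List (String × String)) (k : String) : Option String := List.lookup k r

-- the f-string of A's detail loop body
def aDetail (r : List (String × String)) : String :=
  ((aGet r "component").getD "Unknown") ++ ": " ++ ((aGet r "status").getD "None") ++ ". " ++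
    ((aGet r "observation").getD "") ++ " Recommended action: " ++
    ((aGet r "recommended_action").getD "none") ++ "."

def build_voice_summary_py (machine : String) (inspector : Option String) (results : List (List (String × String))) : String :=
  let pass_ct : Int := results.foldl (fun acc r => if aGet r "status" == some "PASS" then acc + 1 else acc) 0
  let monitor_ct : Int := results.foldl (fun acc r => if aGet r "status" == some "MONITOR" then acc + 1 else acc) 0
  let fail_ct : Int := results.foldl (fun acc r => if aGet r "status" == some "FAIL" then acc + 1 else acc) 0
  let parts : List String := ["Inspection report for " ++ machine ++ "."]
  let parts := match inspector with
    | some s => if s == "" then parts else parts ++ ["Inspector: " ++ s ++ "."]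
    | none => parts
  let parts := parts ++ ["Out of " ++ PySem.Int.toStr (PySem.List.len results) ++ " components inspected, " ++
    PySem.Int.toStr pass_ct ++ " passed, " ++ PySem.Int.toStr monitor_ct ++ " need monitoring, and " ++
    PySem.Int.toStr fail_ct ++ " failed."]
  let attention := results.filter (fun r => aGet r "status" == some "MONITOR" || aGet r "status" == some "FAIL")
  let parts := if attention.isEmpty then parts ++ ["All components passed inspection."]
    else attention.foldl (fun ps r => ps ++ [aDetail r]) (parts ++ ["Items requiring attention:"])
  PySem.Str.join " " parts

-- ===== PORT B =====
def bGet (r : List (String × String)) (k : String) : Option String := List.lookup k r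

def bDetail (r : List (String × String)) : String :=
  ((bGet r "component").getD "Unknown") ++ ": " ++ ((bGet r "status").getD "None") ++ ". " ++
    ((bGet r "observation").getD "") ++ " Recommended action: " ++
    ((bGet r "recommended_action").getD "none") ++ "."

-- loop body of B's single pass: (pass_ct, monitor_ct, fail_ct, attention)
def bStep (st : Int × Int × Int × List (List (String × String))) (r : List (String × String)) :
    Int × Int × Int × List (List (String × String)) :=
  let status := bGet r "status"
  if status == some "PASS" then (st.1 + 1, st.2.1, st.2.2.1, st.2.2.2)
  else if status == some "MONITOR" then (st.1, st.2.1 + 1, st.2.2.1, st.2.2.2 ++ [r])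
  else if status == some "FAIL" then (st.1, st.2.1, st.2.2.1 + 1, st.2.2.2 ++ [r])
  else st

def build_voice_summary_py_alt (machine : String) (inspector : Option String) (results : List (List (String × String))) : String :=
  let st := results.foldl bStep (0, 0, 0, [])
  let head := "Inspection report for " ++ machine ++ "."
  let insp : List String := match inspector with
    | some s => if s == "" then [] else ["Inspector: " ++ s ++ "."]
    | none => []
  let counts := "Out of " ++ PySem.Int.toStr (PySem.List.len results) ++ " components inspected, " ++
    PySem.Int.toStr st.1 ++ " passed, " ++ PySem.Int.toStr st.2.1 ++ " need monitoring, and " ++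
    PySem.Int.toStr st.2.2.1 ++ " failed."
  let tail := if st.2.2.2.isEmpty then ["All components passed inspection."]
    else "Items requiring attention:" :: st.2.2.2.map bDetail
  PySem.Str.join " " ([head] ++ insp ++ [counts] ++ tail)

-- ===== PRECONDITION & SPEC =====
def Spec_build_voice_summary_py (machine : String) (inspector : Option String) (results : List (List (String × String))) (out : String) : Prop := out = build_voice_summary_py_alt machine inspector results
instance (machine : String) (inspector : Option String) (results : List (List (String × String))) (out : String) : Decidable (Spec_build_voice_summary_py machine inspector results out) := by unfold Spec_build_voice_summary_py; infer_instance

-- ===== CLAIM (what is proved, stated in full; the proofs are below) =====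
def Claim_equal_build_voice_summary_py : Prop := ∀ (machine : String) (inspector : Option String) (results : List (List (String × String))), Dom_build_voice_summary_py machine inspector results → Spec_build_voice_summary_py machine inspector results (build_voice_summary_py machine inspector results)

-- ===== LEMMAS AND PROOFS =====

-- B's single pass computes A's three counter scans (from arbitrary starts) and A's attention filter
lemma bvs_scan (rs : List (List (String × String))) (p m f : Int)
    (att : List (List (String × String))) :
    rs.foldl bStep (p, m, f, att) =
      (rs.foldl (fun acc r => if aGet r "status" == some "PASS" then acc + 1 else acc) p,
       rs.foldl (fun acc r => if aGet r "status" == some "MONITOR" then acc + 1 else acc) m,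
       rs.foldl (fun acc r => if aGet r "status" == some "FAIL" then acc + 1 else acc) f,
       att ++ rs.filter (fun r => aGet r "status" == some "MONITOR" || aGet r "status" == some "FAIL")) := by
  induction rs generalizing p m f att with
  | nil => simp
  | cons r rs ih =>
    have hget : bGet r "status" = aGet r "status" := rfl
    simp only [List.foldl_cons, List.filter_cons]
    by_cases hP : aGet r "status" = some "PASS"
    · simp [bStep, hget, hP, ih]
    · by_cases hM : aGet r "status" = some "MONITOR"
      · simp [bStep, hget, hM, ih]
      · by_cases hF : aGet r "status" = some "FAIL"
        · simp [bStep, hget, hF, ih]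
        · simp [bStep, hget, hP, hM, hF, ih]

lemma bDetail_eq_aDetail : bDetail = aDetail := rfl

lemma flatten_map_singleton {α β : Type} (f : α → β) (xs : List α) :
    (xs.map (fun x => [f x])).flatten = xs.map f := by
  induction xs with
  | nil => rfl
  | cons x xs ih => simp [ih]

-- ===== VERDICT (by name: the statement is the Claim_ definition above) =====
theorem build_voice_summary_py_spec : Claim_equal_build_voice_summary_py := by
  intro machine inspector results _
  unfold Spec_build_voice_summary_py build_voice_summary_py build_voice_summary_py_alt
  rw [bvs_scan, bDetail_eq_aDetail]
  simp only [List.nil_append]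
  rcases inspector with _ | s
  · by_cases h : (results.filter (fun r => aGet r "status" == some "MONITOR" || aGet r "status" == some "FAIL")).isEmpty
    · simp [h]
    · simp [h, flatten_map_singleton]
  · by_cases hs : s == ""
    · by_cases h : (results.filter (fun r => aGet r "status" == some "MONITOR" || aGet r "status" == some "FAIL")).isEmpty
      · simp [h, hs]
      · simp [h, hs, flatten_map_singleton]
    · by_cases h : (results.filter (fun r => aGet r "status" == some "MONITOR" || aGet r "status" == some "FAIL")).isEmpty
      · simp [h, hs]
      · simp [h, hs, flatten_map_singleton]
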